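-- pv_equiv track=rewrite | github.com/bufo333/CyberJournal | cyberjournal/world/player_stats.py | _level_for_xp
-- ===== SOURCE A (Python) =====
-- XP_TABLE = [0, 100, 250, 500, 900, 1400, 2100, 3000, 4200, 5800, 8000]
--
-- def _level_for_xp(xp: int) -> int:
--     """Calculate level from total XP."""
--     level = 0
--     for i, threshold in enumerate(XP_TABLE):
--         if xp >= threshold:
--             level = i
--         else:
--             break
--     return level
-- ===== SOURCE B (Python) =====
-- import bisect
--
-- XP_TABLE = [0, 100, 250, 500, 900, 1400, 2100, 3000, 4200, 5800, 8000]
--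
-- def _level_for_xp(xp: int) -> int:
--     """Calculate level from total XP (binary search over the threshold table)."""
--     return max(0, bisect.bisect_right(XP_TABLE, xp) - 1)
-- ===== Notes on version B (the rewrite author's own statement) =====
-- stated objective: idiomatic
-- what changed: Replaces the linear scan with break by a stdlib binary search (bisect.bisect_right) over the sorted XP table, clamping the resulting index so that xp below the first threshold still yields the lowest level.
import Mathlib
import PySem

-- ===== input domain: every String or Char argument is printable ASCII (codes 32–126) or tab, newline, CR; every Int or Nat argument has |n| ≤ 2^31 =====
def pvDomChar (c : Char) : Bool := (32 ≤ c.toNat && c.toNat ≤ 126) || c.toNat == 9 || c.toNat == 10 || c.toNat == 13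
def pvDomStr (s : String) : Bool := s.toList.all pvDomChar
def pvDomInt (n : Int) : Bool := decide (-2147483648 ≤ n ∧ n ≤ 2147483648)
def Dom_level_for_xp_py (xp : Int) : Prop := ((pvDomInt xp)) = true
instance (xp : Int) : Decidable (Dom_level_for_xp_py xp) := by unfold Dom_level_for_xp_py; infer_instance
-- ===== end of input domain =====

-- B replaces A's linear scan-with-break by a stdlib binary search (bisect_right) over the sorted table.
-- ===== PORT A =====
def XP_TABLE : List Int := [0, 100, 250, 500, 900, 1400, 2100, 3000, 4200, 5800, 8000]

-- the 'for i, threshold in enumerate(XP_TABLE): if xp >= threshold: level = i else: break' loop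
def pvALoop (xp : Int) : List (Int × Int) → Int → Int
  | [], level => level
  | (i, threshold) :: rest, level =>
      if xp ≥ threshold then pvALoop xp rest i else level

def level_for_xp_py (xp : Int) : Int :=
  pvALoop xp (PySem.List.enumerate XP_TABLE) 0

-- ===== PORT B =====
-- bisect.bisect_right(a, x): while lo < hi: mid = (lo+hi)//2; if x < a[mid]: hi = mid else: lo = mid+1.
-- Ported with Nat lo/hi and a fuel argument: hi - lo shrinks each iteration, so
-- a.length + 1 steps always suffice; the fuel only makes the while-loop total.
def pvBisectLoop (a : List Int) (x : Int) : Nat → Nat → Nat → Nat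
  | 0, lo, _ => lo
  | fuel + 1, lo, hi =>
      if lo < hi then
        let mid := (lo + hi) / 2
        if x < a.getD mid 0 then pvBisectLoop a x fuel lo mid
        else pvBisectLoop a x fuel (mid + 1) hi
      else lo

def level_for_xp_py_alt (xp : Int) : Int :=
  max 0 ((pvBisectLoop XP_TABLE xp (XP_TABLE.length + 1) 0 XP_TABLE.length : Int) - 1)

-- ===== PRECONDITION & SPEC =====
def Spec_level_for_xp_py (xp : Int) (out : Int) : Prop := out = level_for_xp_py_alt xp
instance (xp : Int) (out : Int) : Decidable (Spec_level_for_xp_py xp out) := by unfold Spec_level_for_xp_py; infer_instance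

-- ===== CLAIM (what is proved, stated in full; the proofs are below) =====
def Claim_equal_level_for_xp_py : Prop := ∀ (xp : Int), Dom_level_for_xp_py xp → Spec_level_for_xp_py xp (level_for_xp_py xp)

-- ===== LEMMAS AND PROOFS =====

theorem lenXP : XP_TABLE.length = 11 := by norm_num [XP_TABLE]

theorem gd0 : XP_TABLE[(0 : Nat)]?.getD 0 = 0 := by norm_num [XP_TABLE]
theorem gd1 : XP_TABLE[(1 : Nat)]?.getD 0 = 100 := by norm_num [XP_TABLE]
theorem gd2 : XP_TABLE[(2 : Nat)]?.getD 0 = 250 := by norm_num [XP_TABLE]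
theorem gd3 : XP_TABLE[(3 : Nat)]?.getD 0 = 500 := by norm_num [XP_TABLE]
theorem gd4 : XP_TABLE[(4 : Nat)]?.getD 0 = 900 := by norm_num [XP_TABLE]
theorem gd5 : XP_TABLE[(5 : Nat)]?.getD 0 = 1400 := by norm_num [XP_TABLE]
theorem gd6 : XP_TABLE[(6 : Nat)]?.getD 0 = 2100 := by norm_num [XP_TABLE]
theorem gd7 : XP_TABLE[(7 : Nat)]?.getD 0 = 3000 := by norm_num [XP_TABLE]
theorem gd8 : XP_TABLE[(8 : Nat)]?.getD 0 = 4200 := by norm_num [XP_TABLE]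
theorem gd9 : XP_TABLE[(9 : Nat)]?.getD 0 = 5800 := by norm_num [XP_TABLE]
theorem gd10 : XP_TABLE[(10 : Nat)]?.getD 0 = 8000 := by norm_num [XP_TABLE]

theorem bisect_term (a : List Int) (x : Int) (f lo : Nat) : pvBisectLoop a x (f + 1) lo lo = lo := by
  simp [pvBisectLoop]

theorem L01 (x : Int) (f : Nat) : pvBisectLoop XP_TABLE x (f + 2) 0 1 = if x < 0 then 0 else 1 := by
  rw [show f + 2 = (f + 1) + 1 from rfl, pvBisectLoop]; norm_num [gd0, gd1, gd2, gd3, gd4, gd5, gd6, gd7, gd8, gd9, gd10, bisect_term]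

theorem L02 (x : Int) (f : Nat) : pvBisectLoop XP_TABLE x (f + 3) 0 2 =
    if x < 100 then (if x < 0 then 0 else 1) else 2 := by
  rw [show f + 3 = (f + 2) + 1 from rfl, pvBisectLoop]; norm_num [gd0, gd1, gd2, gd3, gd4, gd5, gd6, gd7, gd8, gd9, gd10, bisect_term, L01]

theorem L34 (x : Int) (f : Nat) : pvBisectLoop XP_TABLE x (f + 2) 3 4 = if x < 500 then 3 else 4 := by
  rw [show f + 2 = (f + 1) + 1 from rfl, pvBisectLoop]; norm_num [gd0, gd1, gd2, gd3, gd4, gd5, gd6, gd7, gd8, gd9, gd10, bisect_term]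

theorem L35 (x : Int) (f : Nat) : pvBisectLoop XP_TABLE x (f + 3) 3 5 =
    if x < 900 then (if x < 500 then 3 else 4) else 5 := by
  rw [show f + 3 = (f + 2) + 1 from rfl, pvBisectLoop]; norm_num [gd0, gd1, gd2, gd3, gd4, gd5, gd6, gd7, gd8, gd9, gd10, bisect_term, L34]

theorem L05 (x : Int) (f : Nat) : pvBisectLoop XP_TABLE x (f + 4) 0 5 =
    if x < 250 then (if x < 100 then (if x < 0 then 0 else 1) else 2)
    else (if x < 900 then (if x < 500 then 3 else 4) else 5) := by
  rw [show f + 4 = (f + 3) + 1 from rfl, pvBisectLoop]; norm_num [gd0, gd1, gd2, gd3, gd4, gd5, gd6, gd7, gd8, gd9, gd10, L02, L35]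

theorem L67 (x : Int) (f : Nat) : pvBisectLoop XP_TABLE x (f + 2) 6 7 = if x < 2100 then 6 else 7 := by
  rw [show f + 2 = (f + 1) + 1 from rfl, pvBisectLoop]; norm_num [gd0, gd1, gd2, gd3, gd4, gd5, gd6, gd7, gd8, gd9, gd10, bisect_term]

theorem L68 (x : Int) (f : Nat) : pvBisectLoop XP_TABLE x (f + 3) 6 8 =
    if x < 3000 then (if x < 2100 then 6 else 7) else 8 := by
  rw [show f + 3 = (f + 2) + 1 from rfl, pvBisectLoop]; norm_num [gd0, gd1, gd2, gd3, gd4, gd5, gd6, gd7, gd8, gd9, gd10, bisect_term, L67]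

theorem L910 (x : Int) (f : Nat) : pvBisectLoop XP_TABLE x (f + 2) 9 10 = if x < 5800 then 9 else 10 := by
  rw [show f + 2 = (f + 1) + 1 from rfl, pvBisectLoop]; norm_num [gd0, gd1, gd2, gd3, gd4, gd5, gd6, gd7, gd8, gd9, gd10, bisect_term]

theorem L911 (x : Int) (f : Nat) : pvBisectLoop XP_TABLE x (f + 3) 9 11 =
    if x < 8000 then (if x < 5800 then 9 else 10) else 11 := by
  rw [show f + 3 = (f + 2) + 1 from rfl, pvBisectLoop]; norm_num [gd0, gd1, gd2, gd3, gd4, gd5, gd6, gd7, gd8, gd9, gd10, bisect_term, L910]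

theorem L611 (x : Int) (f : Nat) : pvBisectLoop XP_TABLE x (f + 4) 6 11 =
    if x < 4200 then (if x < 3000 then (if x < 2100 then 6 else 7) else 8)
    else (if x < 8000 then (if x < 5800 then 9 else 10) else 11) := by
  rw [show f + 4 = (f + 3) + 1 from rfl, pvBisectLoop]; norm_num [gd0, gd1, gd2, gd3, gd4, gd5, gd6, gd7, gd8, gd9, gd10, L68, L911]

theorem L011 (x : Int) (f : Nat) : pvBisectLoop XP_TABLE x (f + 5) 0 11 =
    if x < 1400 then
      (if x < 250 then (if x < 100 then (if x < 0 then 0 else 1) else 2)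
       else (if x < 900 then (if x < 500 then 3 else 4) else 5))
    else
      (if x < 4200 then (if x < 3000 then (if x < 2100 then 6 else 7) else 8)
       else (if x < 8000 then (if x < 5800 then 9 else 10) else 11)) := by
  rw [show f + 5 = (f + 4) + 1 from rfl, pvBisectLoop]; norm_num [gd0, gd1, gd2, gd3, gd4, gd5, gd6, gd7, gd8, gd9, gd10, L05, L611]


-- ===== VERDICT (by name: the statement is the Claim_ definition above) =====
set_option maxHeartbeats 1600000 in
theorem level_for_xp_py_spec : Claim_equal_level_for_xp_py := by
  intro xp _
  unfold Spec_level_for_xp_py level_for_xp_py level_for_xp_py_alt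
  rw [lenXP, show (11 : Nat) + 1 = 7 + 5 from rfl, L011]
  simp only [XP_TABLE, PySem.List.enumerate_cons, PySem.List.enumerate_nil, pvALoop]
  norm_num
  split_ifs <;> omega
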